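-- pv_equiv track=rewrite | github.com/Llllrf/CoInsight | backend/graph.py | get_state_links
-- ===== SOURCE A (Python) =====
-- def get_state_links(block_list):
--     links = {}
--     curr_s, curr_list = block_list[0]   # first is the current state
--     for i in range(len(curr_list)):
--         block1 = curr_list[i]
--         row1 = block1[0]
--         col1 = block1[1]
--         id1 = get_id(row1, col1, curr_s)
--         curr_block_link = {}
--         for s in range(1, len(block_list)): # iterate all other states
--             state, other_list = block_list[s]
--             state_label = "S"+str(state)
--             state_block_link = []
--             for j in range(len(other_list)):
--                 block2 = other_list[j]
--                 row2 = block2[0]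
--                 col2 = block2[1]
--                 if check_state_link(row1, row2, col1, col2):
--                     id2 = get_id(row2, col2, state)
--                     state_block_link.append(id2)
--
--             if len(state_block_link)!=0:
--                 curr_block_link[state_label] = state_block_link
--         if len(curr_block_link)!=0:
--             links[id1] = curr_block_link
--     return links
--
-- def check_state_link(row1, row2, col1, col2):
--     if row1==row2 or col1==col2:    # same row or same col
--         if len(row1)==0 and len(row2)==0 and col1!=col2 \
--             or len(col1)==0 and len(col2)==0 and row1!=row2:
--             return False
--         else:
--             return True
--     elif check_common_prefix(row1, row2) or check_common_prefix(col1, col2):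
--          # part same row or part same col
--         return True
--     else:
--         return False
--
-- def check_common_prefix(h1, h2):
--     if len(h1) == 0:
--         return False
--     elif len(h1) > len(h2):
--         return False
--     for i in range(len(h1)):
--         if h1[i] != h2[i]:
--             return False
--     return True
--
-- def get_id(idx, col, state):
--     idx_str = "_".join(str(item) for item in idx)
--     col_str = "_".join(str(item) for item in col)
--     id = str(state) + '_' + idx_str + '-' + col_str + '_'
--     return id
-- ===== SOURCE B (Python) =====
-- def get_state_links(block_list):
--     # Inverted-index algorithm: for every other state, build hash maps from each
--     # nonempty row/col prefix to the increasing list of block positions carrying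
--     # it; each current block then finds its partners by dictionary lookup (plus a
--     # small corner filter for empty rows/cols) instead of scanning every block.
--     curr_s, curr_list = block_list[0]
--     indexed = []
--     for state, other in block_list[1:]:
--         row_pre = {}
--         col_pre = {}
--         for j, (row2, col2) in enumerate(other):
--             for k in range(1, len(row2) + 1):
--                 row_pre.setdefault(tuple(row2[:k]), []).append(j)
--             for k in range(1, len(col2) + 1):
--                 col_pre.setdefault(tuple(col2[:k]), []).append(j)
--         indexed.append((state, other, row_pre, col_pre))
--     links = {}
--     for row1, col1 in curr_list:
--         entry = {}
--         for state, other, row_pre, col_pre in indexed: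
--             js = _partners(row1, col1, other, row_pre, col_pre)
--             if js:
--                 entry["S" + str(state)] = [_block_id(other[j][0], other[j][1], state)
--                                            for j in js]
--         if entry:
--             links[_block_id(row1, col1, curr_s)] = entry
--     return links
--
--
-- def _partners(row1, col1, other, row_pre, col_pre):
--     if row1 and col1:
--         return sorted(set(row_pre.get(tuple(row1), [])) |
--                       set(col_pre.get(tuple(col1), [])))
--     if row1:   # col1 == []: drop partners with an empty col and a different row
--         return [j for j in row_pre.get(tuple(row1), [])
--                 if other[j][1] or other[j][0] == row1]
--     if col1:   # row1 == []: drop partners with an empty row and a different col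
--         return [j for j in col_pre.get(tuple(col1), [])
--                 if other[j][0] or other[j][1] == col1]
--     # both empty: linked exactly to the blocks that are empty on both sides
--     return [j for j, b in enumerate(other) if not b[0] and not b[1]]
--
--
-- def _block_id(row, col, state):
--     return "%s_%s-%s_" % (state, "_".join(map(str, row)), "_".join(map(str, col)))
-- ===== Notes on version B (the rewrite author's own statement) =====
-- stated objective: alternative
-- what changed: B precomputes, per other state, hash indexes mapping every nonempty row/col prefix to the increasing list of block positions carrying it, so each current block finds its linked blocks by dictionary lookup (merging two sorted index lists, or filtering one for the empty-row/empty-col corners) instead of A's linear scan of every other block with a per-pair prefix comparison.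
import Mathlib
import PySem

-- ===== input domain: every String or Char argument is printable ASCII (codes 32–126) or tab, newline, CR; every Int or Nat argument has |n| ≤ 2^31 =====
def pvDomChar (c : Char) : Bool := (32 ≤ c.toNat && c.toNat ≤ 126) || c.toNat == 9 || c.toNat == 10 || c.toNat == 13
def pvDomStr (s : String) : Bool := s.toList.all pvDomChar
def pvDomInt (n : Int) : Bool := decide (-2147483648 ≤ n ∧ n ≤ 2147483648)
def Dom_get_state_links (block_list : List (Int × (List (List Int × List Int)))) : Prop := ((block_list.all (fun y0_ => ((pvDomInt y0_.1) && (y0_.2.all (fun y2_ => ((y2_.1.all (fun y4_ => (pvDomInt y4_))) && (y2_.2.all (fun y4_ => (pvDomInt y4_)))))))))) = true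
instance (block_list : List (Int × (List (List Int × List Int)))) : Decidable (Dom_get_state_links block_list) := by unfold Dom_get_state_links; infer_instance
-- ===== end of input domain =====

-- B replaces A's per-block linear scan over every other state's blocks by per-state
-- inverted indexes (each nonempty row/col prefix ↦ the increasing list of block
-- positions carrying it) queried by dictionary lookup; objective: alternative algorithm.

-- ===== PORT A =====
def get_id (idx col : List Int) (state : Int) : String :=
  let idx_str := PySem.Str.join "_" (idx.map PySem.Int.toStr)
  let col_str := PySem.Str.join "_" (col.map PySem.Int.toStr)
  PySem.Int.toStr state ++ "_" ++ idx_str ++ "-" ++ col_str ++ "_"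

def check_common_prefix (h1 h2 : List Int) : Bool :=
  if h1.length = 0 then false
  else if h1.length > h2.length then false
  else (PySem.List.pyRange 0 (h1.length : Int) 1).all
        (fun i => PySem.List.pyGetD h1 i 0 == PySem.List.pyGetD h2 i 0)

def check_state_link (row1 row2 col1 col2 : List Int) : Bool :=
  if row1 == row2 || col1 == col2 then
    if (row1.length == 0 && row2.length == 0 && col1 != col2)
        || (col1.length == 0 && col2.length == 0 && row1 != row2) then false
    else true
  else if check_common_prefix row1 row2 || check_common_prefix col1 col2 then true
  else false

def get_state_links (block_list : List (Int × (List (List Int × List Int)))) : List (String × List (String × List String)) :=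
  match block_list with
  | [] => []   -- Python raises IndexError here; excluded by Pre_
  | (curr_s, curr_list) :: rest =>
    let links : PySem.Dict String (List (String × List String)) :=
      curr_list.foldl (fun links block1 =>
        let row1 := block1.1
        let col1 := block1.2
        let id1 := get_id row1 col1 curr_s
        let curr_block_link : PySem.Dict String (List String) :=
          rest.foldl (fun cbl st =>
            let state := st.1
            let other_list := st.2
            let state_label := "S" ++ PySem.Int.toStr state
            let state_block_link :=
              other_list.foldl (fun acc block2 =>
                let row2 := block2.1
                let col2 := block2.2
                if check_state_link row1 row2 col1 col2 then
                  acc ++ [get_id row2 col2 state]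
                else acc) []
            if (state_block_link : List String).length ≠ 0 then cbl.insert state_label state_block_link
            else cbl) PySem.Dict.empty
        if curr_block_link.size ≠ 0 then links.insert id1 curr_block_link.items
        else links) PySem.Dict.empty
    links.items

-- ===== PORT B =====
def blockId (row col : List Int) (state : Int) : String :=
  PySem.Int.toStr state ++ "_" ++ PySem.Str.join "_" (row.map PySem.Int.toStr)
    ++ "-" ++ PySem.Str.join "_" (col.map PySem.Int.toStr) ++ "_"

def buildIdx (other : List (List Int × List Int)) :
    PySem.Dict (List Int) (List Int) × PySem.Dict (List Int) (List Int) :=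
  (PySem.List.enumerate other).foldl (fun d p =>
    ((PySem.List.pyRange 1 ((PySem.List.len p.2.1) + 1) 1).foldl
        (fun rp k => rp.modify (PySem.List.slice p.2.1 none (some k)) [] (· ++ [p.1])) d.1,
     (PySem.List.pyRange 1 ((PySem.List.len p.2.2) + 1) 1).foldl
        (fun cp k => cp.modify (PySem.List.slice p.2.2 none (some k)) [] (· ++ [p.1])) d.2))
    (PySem.Dict.empty, PySem.Dict.empty)

def partners (row1 col1 : List Int) (other : List (List Int × List Int))
    (rp cp : PySem.Dict (List Int) (List Int)) : List Int :=
  if !row1.isEmpty && !col1.isEmpty then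
    PySem.List.sorted
      (PySem.Set.union (PySem.Set.ofList (rp.getD row1 []))
                       (PySem.Set.ofList (cp.getD col1 []))) (fun x => x) false
  else if !row1.isEmpty then
    (rp.getD row1 []).filter (fun j =>
      !(PySem.List.pyGetD other j ([], [])).2.isEmpty
        || (PySem.List.pyGetD other j ([], [])).1 == row1)
  else if !col1.isEmpty then
    (cp.getD col1 []).filter (fun j =>
      !(PySem.List.pyGetD other j ([], [])).1.isEmpty
        || (PySem.List.pyGetD other j ([], [])).2 == col1)
  else
    ((PySem.List.enumerate other).filter (fun p => p.2.1.isEmpty && p.2.2.isEmpty)).map (·.1)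

def get_state_links_alt (block_list : List (Int × (List (List Int × List Int)))) : List (String × List (String × List String)) :=
  match block_list with
  | [] => []   -- outside Pre_
  | (curr_s, curr_list) :: rest =>
    let indexed : List (Int × List (List Int × List Int) × (PySem.Dict (List Int) (List Int) × PySem.Dict (List Int) (List Int))) :=
      rest.foldl (fun acc st => acc ++ [(st.1, st.2, buildIdx st.2)]) []
    let links : PySem.Dict String (List (String × List String)) :=
      curr_list.foldl (fun links b =>
        let row1 := b.1
        let col1 := b.2
        let entry : PySem.Dict String (List String) :=
          indexed.foldl (fun e t =>
            let state := t.1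
            let other := t.2.1
            let js : List Int := partners row1 col1 other t.2.2.1 t.2.2.2
            if !js.isEmpty then
              e.insert ("S" ++ PySem.Int.toStr state)
                (js.map (fun j => blockId (PySem.List.pyGetD other j ([], [])).1
                                          (PySem.List.pyGetD other j ([], [])).2 state))
            else e) PySem.Dict.empty
        if entry.size ≠ 0 then links.insert (blockId row1 col1 curr_s) entry.items
        else links) PySem.Dict.empty
    links.items

-- ===== PRECONDITION & SPEC =====
-- Python A evaluates block_list[0] first: it raises IndexError exactly on the empty list.
def Pre_get_state_links (block_list : List (Int × (List (List Int × List Int)))) : Prop :=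
  block_list ≠ []
instance (block_list : List (Int × (List (List Int × List Int)))) : Decidable (Pre_get_state_links block_list) := by unfold Pre_get_state_links; infer_instance

def pvWitness_get_state_links : (List (Int × (List (List Int × List Int)))) :=
  [(1, [([1, 2], [0])]), (2, [([1, 2, 3], [5])])]

def Spec_get_state_links (block_list : List (Int × (List (List Int × List Int)))) (out : List (String × List (String × List String))) : Prop := out = get_state_links_alt block_list
instance (block_list : List (Int × (List (List Int × List Int)))) (out : List (String × List (String × List String))) : Decidable (Spec_get_state_links block_list out) := by unfold Spec_get_state_links; infer_instance

-- ===== CLAIM (what is proved, stated in full; the proofs are below) =====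
def Claim_equal_get_state_links : Prop := ∀ (block_list : List (Int × (List (List Int × List Int)))), Dom_get_state_links block_list → Pre_get_state_links block_list → Spec_get_state_links block_list (get_state_links block_list)

-- ===== LEMMAS AND PROOFS =====
def keyMatch (h1 h2 : List Int) : Bool := !h1.isEmpty && h1.isPrefixOf h2

def prefixList (r : List Int) : List (List Int) :=
  (PySem.List.pyRange 1 ((r.length : Int) + 1) 1).map (fun k => PySem.List.slice r none (some k))

theorem prefixList_eq (r : List Int) : prefixList r = (List.range r.length).map (fun k => r.take (k+1)) := by
  unfold prefixList
  rw [PySem.List.pyRange_one, List.map_map]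
  have h : ((r.length : Int) + 1 - 1).toNat = r.length := by omega
  rw [h]
  apply List.map_congr_left
  intro k hk
  simp only [Function.comp]
  rw [show (1 : Int) + k = ((k+1 : Nat) : Int) by push_cast; ring, PySem.List.slice_to_natCast]

theorem mem_prefixList (key r : List Int) : key ∈ prefixList r ↔ keyMatch key r = true := by
  rw [prefixList_eq]
  simp only [List.mem_map, List.mem_range, keyMatch, Bool.and_eq_true, Bool.not_eq_true',
    List.isEmpty_eq_false_iff, List.isPrefixOf_iff_prefix]
  constructor
  · rintro ⟨k, hk, rfl⟩
    have hr : r ≠ [] := by intro h; subst h; simp at hk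
    refine ⟨by simp [List.take_eq_nil_iff, hr], List.take_prefix _ _⟩
  · rintro ⟨hne, hpre⟩
    refine ⟨key.length - 1, ?_, ?_⟩
    · have := hpre.length_le; have : 0 < key.length := List.length_pos_of_ne_nil hne; omega
    · have h1 : key.length - 1 + 1 = key.length := by
        have : 0 < key.length := List.length_pos_of_ne_nil hne; omega
      rw [h1]
      exact (List.prefix_iff_eq_take.mp hpre).symm

theorem nodup_prefixList (r : List Int) : (prefixList r).Nodup := by
  rw [prefixList_eq]
  apply List.Nodup.map_on ?_ (List.nodup_range)
  intro a ha b hb hab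
  simp only [List.mem_range] at ha hb
  have := congrArg List.length hab
  simp only [List.length_take] at this
  omega

theorem filter_beq_nodup {α : Type} [BEq α] [LawfulBEq α] (l : List α) (hnd : l.Nodup) (key : α) :
    l.filter (fun x => x == key) = if key ∈ l then [key] else [] := by
  induction l with
  | nil => simp
  | cons x xs ih =>
    simp only [List.nodup_cons] at hnd
    rw [List.filter_cons]
    by_cases hx : x = key
    · subst hx
      simp [ih hnd.2, hnd.1]
    · have hx' : ¬ key = x := fun h => hx h.symm
      simp only [beq_iff_eq, hx]
      rw [ih hnd.2]
      simp [hx']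

theorem addOne (d : PySem.Dict (List Int) (List Int)) (r : List Int) (v : Int) (key : List Int) :
    ((PySem.List.pyRange 1 ((r.length : Int) + 1) 1).foldl
        (fun rp k => rp.modify (PySem.List.slice r none (some k)) [] (· ++ [v])) d).getD key []
      = d.getD key [] ++ (if keyMatch key r then [v] else []) := by
  have h1 : (PySem.List.pyRange 1 ((r.length : Int) + 1) 1).foldl
        (fun rp k => rp.modify (PySem.List.slice r none (some k)) [] (· ++ [v])) d
      = ((prefixList r).map (fun q => (q, v))).foldl (fun d p => d.modify p.1 [] (· ++ [p.2])) d := by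
    rw [List.foldl_map]
    unfold prefixList
    rw [List.foldl_map]
  rw [h1, PySem.Dict.getD_foldl_modify_append, List.filter_map]
  have h2 : ((fun p => p.1 == key) ∘ fun q => (q, v)) = fun q => q == key := rfl
  rw [h2, filter_beq_nodup _ (nodup_prefixList r) key, List.map_map]
  by_cases hm : key ∈ prefixList r
  · have := (mem_prefixList key r).mp hm
    simp [hm, this]
  · have : ¬ keyMatch key r = true := fun h => hm ((mem_prefixList key r).mpr h)
    simp [hm, this]

theorem enumFold_getD (other : List (List Int × List Int))
    (f : List Int × List Int → List Int) (key : List Int) :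
    ∀ (s : Int) (d : PySem.Dict (List Int) (List Int)),
    ((PySem.List.enumerate other s).foldl (fun d p =>
        (PySem.List.pyRange 1 (((f p.2).length : Int) + 1) 1).foldl
          (fun rp k => rp.modify (PySem.List.slice (f p.2) none (some k)) [] (· ++ [p.1])) d) d).getD key []
      = d.getD key []
        ++ ((PySem.List.enumerate other s).filter (fun p => keyMatch key (f p.2))).map (·.1) := by
  induction other with
  | nil => intro s d; simp [PySem.List.enumerate_nil]
  | cons b bs ih =>
    intro s d
    rw [PySem.List.enumerate_cons, List.foldl_cons, ih (s+1), addOne, List.filter_cons]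
    by_cases h : keyMatch key (f b) = true <;> simp [h]

theorem buildIdx_split (other : List (List Int × List Int)) :
    buildIdx other
      = ((PySem.List.enumerate other).foldl (fun d1 p =>
            (PySem.List.pyRange 1 ((PySem.List.len p.2.1) + 1) 1).foldl
              (fun rp k => rp.modify (PySem.List.slice p.2.1 none (some k)) [] (· ++ [p.1])) d1)
          PySem.Dict.empty,
         (PySem.List.enumerate other).foldl (fun d2 p =>
            (PySem.List.pyRange 1 ((PySem.List.len p.2.2) + 1) 1).foldl
              (fun cp k => cp.modify (PySem.List.slice p.2.2 none (some k)) [] (· ++ [p.1])) d2)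
          PySem.Dict.empty) := by
  unfold buildIdx
  exact PySem.List.foldl_prod_mk
      (f := fun (d1 : PySem.Dict (List Int) (List Int)) (p : Int × (List Int × List Int)) =>
        (PySem.List.pyRange 1 ((PySem.List.len p.2.1) + 1) 1).foldl
          (fun rp k => rp.modify (PySem.List.slice p.2.1 none (some k)) [] (· ++ [p.1])) d1)
      (g := fun (d2 : PySem.Dict (List Int) (List Int)) (p : Int × (List Int × List Int)) =>
        (PySem.List.pyRange 1 ((PySem.List.len p.2.2) + 1) 1).foldl
          (fun cp k => cp.modify (PySem.List.slice p.2.2 none (some k)) [] (· ++ [p.1])) d2)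
      _ _ _

theorem buildIdx_fst_getD (other : List (List Int × List Int)) (key : List Int) :
    (buildIdx other).1.getD key []
      = ((PySem.List.enumerate other).filter (fun p => keyMatch key p.2.1)).map (·.1) := by
  rw [buildIdx_split]
  simp only [PySem.List.len_eq]
  rw [enumFold_getD other (fun b => b.1) key 0 PySem.Dict.empty]
  simp

theorem buildIdx_snd_getD (other : List (List Int × List Int)) (key : List Int) :
    (buildIdx other).2.getD key []
      = ((PySem.List.enumerate other).filter (fun p => keyMatch key p.2.2)).map (·.1) := by
  rw [buildIdx_split]
  simp only [PySem.List.len_eq]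
  rw [enumFold_getD other (fun b => b.2) key 0 PySem.Dict.empty]
  simp

theorem ccp_eq (h1 h2 : List Int) : check_common_prefix h1 h2 = keyMatch h1 h2 := by
  unfold check_common_prefix keyMatch
  rw [Bool.eq_iff_iff]
  simp only [Bool.and_eq_true, Bool.not_eq_true', List.isEmpty_eq_false_iff,
    List.isPrefixOf_iff_prefix, List.prefix_iff_eq_take]
  split_ifs with hz hgt
  · simp [List.length_eq_zero_iff.mp hz]
  · constructor
    · simp
    · rintro ⟨-, htake⟩
      have := congrArg List.length htake
      simp at this
      omega
  · simp only [List.all_eq_true, PySem.List.mem_pyRange_one]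
    constructor
    · intro h
      refine ⟨by simpa [← List.length_eq_zero_iff] using hz, ?_⟩
      apply List.ext_getElem
      · simp; omega
      · intro n hn hn'
        have hn2 : n < h1.length := hn
        have := h (n : Int) ⟨by positivity, by exact_mod_cast hn2⟩
        rw [PySem.List.pyGetD_eq_getElem h1 0 (by positivity) (by omega),
            PySem.List.pyGetD_eq_getElem h2 0 (by positivity) (by omega)] at this
        have h2' := beq_iff_eq.mp this
        simp only [Int.toNat_natCast] at h2'
        rw [List.getElem_take]
        exact h2'
    · rintro ⟨hne, htake⟩ i hi
      have h0 : 0 ≤ i := hi.1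
      have hlt : i.toNat < h1.length := by omega
      have hlt2 : i.toNat < h2.length := by omega
      rw [PySem.List.pyGetD_eq_getElem h1 0 h0 (by omega),
          PySem.List.pyGetD_eq_getElem h2 0 h0 (by omega)]
      have h' : h1[i.toNat]'hlt = (List.take h1.length h2)[i.toNat]'(by simp; omega) := by
        simp [← htake]
      rw [List.getElem_take] at h'
      simp [h']

theorem keyMatch_refl (h : List Int) (hne : h ≠ []) : keyMatch h h = true := by
  simp [keyMatch, hne]

theorem csl_both (row1 col1 r2 c2 : List Int) (hr : row1 ≠ []) (hc : col1 ≠ []) :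
    check_state_link row1 r2 col1 c2 = (keyMatch row1 r2 || keyMatch col1 c2) := by
  unfold check_state_link
  rw [ccp_eq, ccp_eq]
  by_cases h : (row1 == r2 || col1 == c2) = true
  · simp only [h, if_true]
    rcases Bool.or_eq_true _ _ |>.mp h with h' | h'
    · have : r2 = row1 := (beq_iff_eq.mp h').symm
      subst this
      simp [keyMatch_refl _ hr, hr, List.length_eq_zero_iff]
    · have : c2 = col1 := (beq_iff_eq.mp h').symm
      subst this
      simp [keyMatch_refl _ hc, hc, List.length_eq_zero_iff]
  · simp only [h, Bool.false_eq_true, if_false]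
    cases hb : (keyMatch row1 r2 || keyMatch col1 c2) <;> simp

theorem csl_row (row1 r2 c2 : List Int) (hr : row1 ≠ []) :
    check_state_link row1 r2 [] c2 = (keyMatch row1 r2 && (!c2.isEmpty || r2 == row1)) := by
  unfold check_state_link
  rw [ccp_eq, ccp_eq]
  by_cases hre : r2 = row1
  · subst hre
    simp [keyMatch_refl _ hr, hr, List.length_eq_zero_iff]
  · have h1 : (row1 == r2) = false := beq_eq_false_iff_ne.mpr (fun h => hre h.symm)
    have h1' : (r2 == row1) = false := beq_eq_false_iff_ne.mpr hre
    by_cases hc2 : c2 = []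
    · subst hc2
      have hrr : ¬ row1 = r2 := fun h => hre h.symm
      simp [h1, h1', hrr, keyMatch]
    · have h2 : (([] : List Int) == c2) = false := beq_eq_false_iff_ne.mpr (fun h => hc2 h.symm)
      have h3 : keyMatch [] c2 = false := rfl
      simp only [h1, h2, h3, h1', Bool.or_self, Bool.false_eq_true, if_false, Bool.or_false]
      have hc2' : c2.isEmpty = false := by simp [hc2]
      rw [hc2']
      cases hb : keyMatch row1 r2 <;> simp

theorem csl_col (col1 r2 c2 : List Int) (hc : col1 ≠ []) :
    check_state_link [] r2 col1 c2 = (keyMatch col1 c2 && (!r2.isEmpty || c2 == col1)) := by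
  unfold check_state_link
  rw [ccp_eq, ccp_eq]
  by_cases hce : c2 = col1
  · subst hce
    simp [keyMatch_refl _ hc, hc, List.length_eq_zero_iff]
  · have h1 : (col1 == c2) = false := beq_eq_false_iff_ne.mpr (fun h => hce h.symm)
    have h1' : (c2 == col1) = false := beq_eq_false_iff_ne.mpr hce
    by_cases hr2 : r2 = []
    · subst hr2
      have hcc : ¬ col1 = c2 := fun h => hce h.symm
      simp [h1, h1', hcc, keyMatch]
    · have h2 : (([] : List Int) == r2) = false := beq_eq_false_iff_ne.mpr (fun h => hr2 h.symm)
      have h3 : keyMatch [] r2 = false := rfl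
      simp only [h1, h2, h3, h1', Bool.or_self, Bool.false_eq_true, if_false, Bool.false_or]
      have hr2' : r2.isEmpty = false := by simp [hr2]
      rw [hr2']
      cases hb : keyMatch col1 c2 <;> simp

theorem csl_none (r2 c2 : List Int) :
    check_state_link [] r2 [] c2 = (r2.isEmpty && c2.isEmpty) := by
  unfold check_state_link
  rw [ccp_eq, ccp_eq]
  have h3 : keyMatch [] r2 = false := rfl
  have h4 : keyMatch [] c2 = false := rfl
  by_cases hr2 : r2 = [] <;> by_cases hc2 : c2 = []
  · subst hr2; subst hc2; rfl
  · subst hr2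
    have : (([] : List Int) == c2) = false := beq_eq_false_iff_ne.mpr (fun h => hc2 h.symm)
    have hc2' : c2.isEmpty = false := by simp [hc2]
    simp [this, hc2', hc2]
  · subst hc2
    have : (([] : List Int) == r2) = false := beq_eq_false_iff_ne.mpr (fun h => hr2 h.symm)
    have hr2' : r2.isEmpty = false := by simp [hr2]
    simp [this, hr2', hr2]
  · have e1 : (([] : List Int) == r2) = false := beq_eq_false_iff_ne.mpr (fun h => hr2 h.symm)
    have e2 : (([] : List Int) == c2) = false := beq_eq_false_iff_ne.mpr (fun h => hc2 h.symm)
    have hr2' : r2.isEmpty = false := by simp [hr2]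
    simp [e1, e2, h3, h4, hr2']

theorem pyGetD_of_mem_enumerate {α : Type} {p : Int × α} {l : List α} (d : α)
    (h : p ∈ PySem.List.enumerate l) : PySem.List.pyGetD l p.1 d = p.2 := by
  rw [PySem.List.mem_enumerate_iff] at h
  obtain ⟨k, hk, rfl⟩ := h
  simp [PySem.List.pyGetD_natCast, List.getD_eq_getElem?_getD, List.getElem?_eq_getElem hk]

theorem enum_filter_map {α γ : Type} (l : List α) (P : α → Bool) (f : α → γ) :
    ∀ s : Int, ((PySem.List.enumerate l s).filter (fun p => P p.2)).map (fun p => f p.2)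
      = (l.filter P).map f := by
  induction l with
  | nil => intro s; simp [PySem.List.enumerate_nil]
  | cons x xs ih =>
    intro s
    rw [PySem.List.enumerate_cons, List.filter_cons, List.filter_cons]
    by_cases h : P x <;> simp [h, ih (s+1)]

theorem pairwise_lt_filter_map_fst {α : Type} (l : List α) (Q : Int × α → Bool) :
    (((PySem.List.enumerate l).filter Q).map (·.1)).Pairwise (· < ·) := by
  apply List.Pairwise.map
  · exact fun a b h => h
  · exact (PySem.List.pairwise_lt_enumerate l 0).filter Q

theorem nodup_filter_map_fst {α : Type} (l : List α) (Q : Int × α → Bool) :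
    (((PySem.List.enumerate l).filter Q).map (·.1)).Nodup := by
  exact (pairwise_lt_filter_map_fst l Q).imp (fun h => Int.ne_of_lt h)

theorem partners_eq (row1 col1 : List Int) (other : List (List Int × List Int)) :
    partners row1 col1 other (buildIdx other).1 (buildIdx other).2
      = ((PySem.List.enumerate other).filter
          (fun p => check_state_link row1 p.2.1 col1 p.2.2)).map (·.1) := by
  unfold partners
  by_cases hr : row1 = [] <;> by_cases hc : col1 = []
  · -- both empty
    subst hr; subst hc
    simp only [List.isEmpty_nil, Bool.not_true, Bool.false_and, Bool.false_eq_true, if_false]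
    congr 1
    apply List.filter_congr
    intro p hp
    rw [csl_none]
  · -- row1 = [], col1 ≠ []
    subst hr
    have hc' : col1.isEmpty = false := by simp [hc]
    simp only [List.isEmpty_nil, Bool.not_true, Bool.false_and, Bool.false_eq_true, if_false,
      hc', Bool.not_false, if_true]
    rw [buildIdx_snd_getD, List.filter_map]
    congr 1
    rw [List.filter_filter]
    apply List.filter_congr
    intro p hp
    rw [csl_col _ _ _ hc]
    have hg := pyGetD_of_mem_enumerate (([], []) : List Int × List Int) hp
    simp only [Function.comp, hg]
    rw [Bool.and_comm]
  · -- row1 ≠ [], col1 = []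
    subst hc
    have hr' : row1.isEmpty = false := by simp [hr]
    simp only [List.isEmpty_nil, Bool.not_true, Bool.and_false, Bool.false_eq_true, if_false,
      hr', Bool.not_false, if_true]
    rw [buildIdx_fst_getD, List.filter_map]
    congr 1
    rw [List.filter_filter]
    apply List.filter_congr
    intro p hp
    rw [csl_row _ _ _ hr]
    have hg := pyGetD_of_mem_enumerate (([], []) : List Int × List Int) hp
    simp only [Function.comp, hg]
    rw [Bool.and_comm]
  · -- both nonempty
    have hr' : row1.isEmpty = false := by simp [hr]
    have hc' : col1.isEmpty = false := by simp [hc]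
    simp only [hr', hc', Bool.not_false, Bool.and_self, if_true]
    rw [buildIdx_fst_getD, buildIdx_snd_getD]
    apply PySem.List.sorted_eq_of_perm_of_pairwise_lt
    · rw [List.perm_ext_iff_of_nodup]
      · intro x
        rw [PySem.Set.mem_union]
        simp only [PySem.Set.mem_ofList, List.mem_map, List.mem_filter]
        constructor
        · rintro ⟨p, ⟨hp, hq⟩, rfl⟩
          rw [csl_both _ _ _ _ hr hc] at hq
          rcases Bool.or_eq_true _ _ |>.mp hq with h | h
          · exact Or.inl ⟨p, ⟨hp, h⟩, rfl⟩
          · exact Or.inr ⟨p, ⟨hp, h⟩, rfl⟩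
        · rintro (⟨p, ⟨hp, hq⟩, rfl⟩ | ⟨p, ⟨hp, hq⟩, rfl⟩) <;>
            exact ⟨p, ⟨hp, by rw [csl_both _ _ _ _ hr hc]; simp [hq]⟩, rfl⟩
      · exact nodup_filter_map_fst _ _
      · exact PySem.Set.nodup_union _ _ (PySem.Set.nodup_ofList _)
    · exact pairwise_lt_filter_map_fst _ _

theorem blockId_eq_get_id (r c : List Int) (s : Int) : blockId r c s = get_id r c s := rfl

theorem ids_eq (row1 col1 : List Int) (state : Int) (other : List (List Int × List Int)) :
    (partners row1 col1 other (buildIdx other).1 (buildIdx other).2).map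
        (fun j => blockId (PySem.List.pyGetD other j ([], [])).1
                          (PySem.List.pyGetD other j ([], [])).2 state)
      = other.foldl (fun acc b2 =>
          if check_state_link row1 b2.1 col1 b2.2 then acc ++ [get_id b2.1 b2.2 state]
          else acc) [] := by
  rw [partners_eq, List.map_map,
    PySem.List.foldl_append_if (fun b2 => check_state_link row1 b2.1 col1 b2.2)
      (fun b2 => get_id b2.1 b2.2 state) other []]
  rw [List.nil_append]
  have hcg : List.map
      ((fun j => blockId (PySem.List.pyGetD other j ([], [])).1
          (PySem.List.pyGetD other j ([], [])).2 state) ∘ fun (x : Int × (List Int × List Int)) => x.1)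
      ((PySem.List.enumerate other).filter (fun p => check_state_link row1 p.2.1 col1 p.2.2))
      = List.map (fun (p : Int × (List Int × List Int)) => get_id p.2.1 p.2.2 state)
      ((PySem.List.enumerate other).filter (fun p => check_state_link row1 p.2.1 col1 p.2.2)) :=
    List.map_congr_left (fun p hp => by
      have hg := pyGetD_of_mem_enumerate (([], []) : List Int × List Int)
        (List.mem_of_mem_filter hp)
      simp only [Function.comp, hg, blockId_eq_get_id])
  rw [hcg]
  exact enum_filter_map other (fun b => check_state_link row1 b.1 col1 b.2)
    (fun b => get_id b.1 b.2 state) 0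

theorem body_eq (b : List Int × List Int) (st : Int × List (List Int × List Int))
    (e : PySem.Dict String (List String)) :
    (if (!(partners b.1 b.2 st.2 (buildIdx st.2).1 (buildIdx st.2).2).isEmpty) = true then
       e.insert ("S" ++ PySem.Int.toStr st.1)
         ((partners b.1 b.2 st.2 (buildIdx st.2).1 (buildIdx st.2).2).map
           (fun j => blockId (PySem.List.pyGetD st.2 j ([], [])).1
                             (PySem.List.pyGetD st.2 j ([], [])).2 st.1))
     else e)
    = (if (st.2.foldl (fun acc b2 =>
            if check_state_link b.1 b2.1 b.2 b2.2 then acc ++ [get_id b2.1 b2.2 st.1]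
            else acc) []).length ≠ 0 then
         e.insert ("S" ++ PySem.Int.toStr st.1)
           (st.2.foldl (fun acc b2 =>
             if check_state_link b.1 b2.1 b.2 b2.2 then acc ++ [get_id b2.1 b2.2 st.1]
             else acc) [])
       else e) := by
  rw [← ids_eq b.1 b.2 st.1 st.2]
  cases hjs : partners b.1 b.2 st.2 (buildIdx st.2).1 (buildIdx st.2).2 <;> simp

-- ===== VERDICT (by name: the statement is the Claim_ definition above) =====
theorem get_state_links_spec : Claim_equal_get_state_links := by
  intro bl hdom hpre
  unfold Spec_get_state_links
  cases bl with
  | nil => rfl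
  | cons hd rest =>
    obtain ⟨curr_s, curr_list⟩ := hd
    simp only [get_state_links, get_state_links_alt]
    rw [PySem.List.foldl_append_singleton_eq_map, List.nil_append]
    simp only [List.foldl_map]
    congr 1
    apply PySem.List.foldl_congr_mem
    intro links b _
    have hcbl := PySem.List.foldl_congr_mem (l := rest)
      (init := (PySem.Dict.empty : PySem.Dict String (List String)))
      (f := fun (cbl : PySem.Dict String (List String)) (st : Int × List (List Int × List Int)) =>
        if (st.2.foldl (fun acc b2 =>
              if check_state_link b.1 b2.1 b.2 b2.2 then acc ++ [get_id b2.1 b2.2 st.1]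
              else acc) []).length ≠ 0 then
          cbl.insert ("S" ++ PySem.Int.toStr st.1)
            (st.2.foldl (fun acc b2 =>
              if check_state_link b.1 b2.1 b.2 b2.2 then acc ++ [get_id b2.1 b2.2 st.1]
              else acc) [])
        else cbl)
      (g := fun (e : PySem.Dict String (List String)) (st : Int × List (List Int × List Int)) =>
        if (!(partners b.1 b.2 st.2 (buildIdx st.2).1 (buildIdx st.2).2).isEmpty) = true then
          e.insert ("S" ++ PySem.Int.toStr st.1)
            ((partners b.1 b.2 st.2 (buildIdx st.2).1 (buildIdx st.2).2).map
              (fun j => blockId (PySem.List.pyGetD st.2 j ([], [])).1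
                                (PySem.List.pyGetD st.2 j ([], [])).2 st.1))
        else e)
      (fun e st _ => (body_eq b st e).symm)
    simp only [hcbl, blockId_eq_get_id]
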